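-- pv_equiv track=rewrite | github.com/XingruiWang/XModBench | benchmark/scripts/process/2_spatial_audio/paranoma/augment_spatial_audio.py | is_in_quality_range
-- ===== SOURCE A (Python) =====
-- def is_in_quality_range(azimuth):
--     """Check if azimuth is in one of the high quality ranges"""
--     # Normalize azimuth to [0, 360) for easier range checking
--     az = azimuth % 360
--
--     quality_ranges = [
--         (340, 360),  # (-20, 0) mapped to (340, 360)
--         (0, 20),     # (0, 20)
--         (70, 110),   # (70, 110)
--         (160, 200),  # (160, 200)
--         (250, 290)   # (250, 290)
--     ]
--
--     for start, end in quality_ranges: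
--         if start <= az <= end:
--             return True
--     return False
-- ===== SOURCE B (Python) =====
-- def is_in_quality_range(azimuth):
--     """Check if azimuth is in one of the high quality ranges"""
--     # The five ranges are exactly the points within 20 degrees of a multiple of 90.
--     r = azimuth % 90
--     return r <= 20 or r >= 70
-- ===== Notes on version B (the rewrite author's own statement) =====
-- stated objective: simpler
-- what changed: Replaced the five-entry range table and the loop over it with a single modular closed form: the ranges are exactly the azimuths within 20 degrees of a multiple of 90, so B tests r = azimuth % 90; r <= 20 or r >= 70.
import Mathlib
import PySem

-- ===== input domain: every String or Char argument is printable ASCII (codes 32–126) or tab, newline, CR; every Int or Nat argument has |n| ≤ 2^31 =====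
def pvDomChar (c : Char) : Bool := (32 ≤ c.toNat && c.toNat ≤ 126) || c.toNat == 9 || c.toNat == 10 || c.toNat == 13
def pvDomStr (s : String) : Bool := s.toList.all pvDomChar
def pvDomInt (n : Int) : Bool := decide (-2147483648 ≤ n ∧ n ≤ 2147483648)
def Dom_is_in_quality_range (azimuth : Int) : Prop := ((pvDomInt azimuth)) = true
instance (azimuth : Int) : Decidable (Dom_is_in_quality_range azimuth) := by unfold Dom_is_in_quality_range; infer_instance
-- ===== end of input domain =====

-- B replaces A's range table and loop by one modular closed form (objective: simpler).

-- ===== PORT A =====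
-- literal port: normalize to [0,360), then check the five ranges in order
def is_in_quality_range (azimuth : Int) : Bool :=
  let az := PySem.Int.mod azimuth 360
  let quality_ranges : List (Int × Int) := [(340, 360), (0, 20), (70, 110), (160, 200), (250, 290)]
  (quality_ranges.find? (fun se => decide (se.1 ≤ az ∧ az ≤ se.2))).isSome

-- ===== PORT B =====
def is_in_quality_range_alt (azimuth : Int) : Bool :=
  let r := PySem.Int.mod azimuth 90
  decide (r ≤ 20 ∨ r ≥ 70)

-- ===== PRECONDITION & SPEC =====
def Spec_is_in_quality_range (azimuth : Int) (out : Bool) : Prop := out = is_in_quality_range_alt azimuth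
instance (azimuth : Int) (out : Bool) : Decidable (Spec_is_in_quality_range azimuth out) := by unfold Spec_is_in_quality_range; infer_instance

-- ===== CLAIM (what is proved, stated in full; the proofs are below) =====
def Claim_equal_is_in_quality_range : Prop := ∀ (azimuth : Int), Dom_is_in_quality_range azimuth → Spec_is_in_quality_range azimuth (is_in_quality_range azimuth)

-- ===== LEMMAS AND PROOFS =====

-- ===== VERDICT (by name: the statement is the Claim_ definition above) =====
theorem is_in_quality_range_spec : Claim_equal_is_in_quality_range := by
  intro azimuth _
  unfold Spec_is_in_quality_range is_in_quality_range is_in_quality_range_alt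
  rw [PySem.Int.mod_eq_emod_of_pos (by omega : (0:Int) < 360),
      PySem.Int.mod_eq_emod_of_pos (by omega : (0:Int) < 90)]
  rw [Bool.eq_iff_iff]
  simp [List.find?_isSome, decide_eq_true_eq]
  omega
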